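-- pv_equiv track=rewrite | github.com/rbroderi/pyptmpl | src/pyptmpl/creator_core/license_ops.py | _replace_project_classifiers
-- ===== SOURCE A (Python) =====
-- def _replace_project_classifiers(section: list[str], classifiers: list[str]) -> list[str]:
--     out: list[str] = []
--     in_classifiers = False
--     for line in section:
--         stripped = line.strip()
--         if stripped.startswith("classifiers = ["):
--             in_classifiers = True
--             continue
--         if in_classifiers:
--             if stripped == "]":
--                 in_classifiers = False
--             continue
--         out.append(line)
--
--     block = [
--         "classifiers = [",
--         *[f'  "{item}",' for item in classifiers],
--         "]",
--     ]
--
--     insert_at = len(out)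
--     for idx, line in enumerate(out):
--         if line.strip().startswith("requires-python ="):
--             insert_at = idx + 1
--             break
--     return out[:insert_at] + block + out[insert_at:]
-- ===== SOURCE B (Python) =====
-- def _replace_project_classifiers(section: list[str], classifiers: list[str]) -> list[str]:
--     block = ["classifiers = [", *[f'  "{item}",' for item in classifiers], "]"]
--     out: list[str] = []
--     in_classifiers = False
--     inserted = False
--     for line in section:
--         stripped = line.strip()
--         if in_classifiers:
--             if stripped == "]":
--                 in_classifiers = False
--             continue
--         if stripped.startswith("classifiers = ["):
--             in_classifiers = True
--             continue
--         out.append(line)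
--         if not inserted and stripped.startswith("requires-python ="):
--             out.extend(block)
--             inserted = True
--     if not inserted:
--         out.extend(block)
--     return out
-- ===== Notes on version B (the rewrite author's own statement) =====
-- stated objective: alternative
-- what changed: B does one traversal of the section carrying in_classifiers and inserted flags, splicing the new classifiers block immediately after the first surviving requires-python line (or at the end), instead of A's filter pass followed by an enumerate-search pass and slice concatenation.
import Mathlib
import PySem

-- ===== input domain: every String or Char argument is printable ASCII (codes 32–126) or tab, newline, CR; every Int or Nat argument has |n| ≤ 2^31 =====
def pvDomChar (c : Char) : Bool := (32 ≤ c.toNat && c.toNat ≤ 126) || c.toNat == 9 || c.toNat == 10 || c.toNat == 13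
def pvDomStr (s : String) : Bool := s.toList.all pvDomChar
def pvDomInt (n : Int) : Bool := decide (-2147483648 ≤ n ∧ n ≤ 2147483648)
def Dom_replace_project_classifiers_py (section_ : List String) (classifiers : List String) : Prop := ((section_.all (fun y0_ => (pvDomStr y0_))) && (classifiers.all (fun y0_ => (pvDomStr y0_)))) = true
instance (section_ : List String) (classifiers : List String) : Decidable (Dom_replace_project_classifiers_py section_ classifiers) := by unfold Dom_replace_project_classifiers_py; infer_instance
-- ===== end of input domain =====

-- B replaces A's filter pass + enumerate-search pass + slice splice by ONE traversal of the
-- section carrying in_classifiers and inserted flags (objective: alternative decomposition).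

-- ===== PORT A =====
-- the first for-loop of A: filter out the old classifiers block, state = in_classifiers
def pvAFilter : List String → Bool → List String
  | [], _ => []
  | line :: rest, inc =>
    if PySem.Str.startswith (PySem.Str.strip line) "classifiers = [" then pvAFilter rest true
    else if inc then
      (if PySem.Str.strip line == "]" then pvAFilter rest false else pvAFilter rest true)
    else line :: pvAFilter rest inc

-- the second for-loop of A: first index whose strip starts with "requires-python =", plus one
def pvAFind : List String → Nat → Option Nat
  | [], _ => none
  | line :: rest, idx =>
    if PySem.Str.startswith (PySem.Str.strip line) "requires-python =" then some (idx + 1)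
    else pvAFind rest (idx + 1)

def replace_project_classifiers_py (section_ : List String) (classifiers : List String) : List String :=
  let out := pvAFilter section_ false
  let block := "classifiers = [" :: (classifiers.map (fun item => "  \"" ++ item ++ "\",") ++ ["]"])
  let insert_at := (pvAFind out 0).getD out.length  -- insert_at = len(out) unless the loop breaks
  -- out[:insert_at] + block + out[insert_at:]; insert_at is a nonnegative in-range index, so take/drop are exact
  out.take insert_at ++ block ++ out.drop insert_at

-- ===== PORT B =====
-- B's single loop; state = (in_classifiers, inserted), block spliced in place
def pvBLoop (block : List String) : List String → Bool → Bool → List String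
  | [], _, inserted => if inserted then [] else block
  | line :: rest, inc, inserted =>
    if inc then pvBLoop block rest (!(PySem.Str.strip line == "]")) inserted
    else if PySem.Str.startswith (PySem.Str.strip line) "classifiers = [" then pvBLoop block rest true inserted
    else if !inserted && PySem.Str.startswith (PySem.Str.strip line) "requires-python =" then
      line :: (block ++ pvBLoop block rest false true)
    else line :: pvBLoop block rest false inserted

def replace_project_classifiers_py_alt (section_ : List String) (classifiers : List String) : List String :=
  let block := "classifiers = [" :: (classifiers.map (fun item => "  \"" ++ item ++ "\",") ++ ["]"])
  pvBLoop block section_ false false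

-- ===== PRECONDITION & SPEC =====
def Spec_replace_project_classifiers_py (section_ : List String) (classifiers : List String) (out : List String) : Prop := out = replace_project_classifiers_py_alt section_ classifiers
instance (section_ : List String) (classifiers : List String) (out : List String) : Decidable (Spec_replace_project_classifiers_py section_ classifiers out) := by unfold Spec_replace_project_classifiers_py; infer_instance

-- ===== CLAIM (what is proved, stated in full; the proofs are below) =====
def Claim_equal_replace_project_classifiers_py : Prop := ∀ (section_ : List String) (classifiers : List String), Dom_replace_project_classifiers_py section_ classifiers → Spec_replace_project_classifiers_py section_ classifiers (replace_project_classifiers_py section_ classifiers)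

-- ===== LEMMAS AND PROOFS =====

-- a recursive characterisation of A's splice: insert block after the first requires-python line
def pvSplice (block : List String) : List String → List String
  | [] => block
  | line :: rest =>
    if PySem.Str.startswith (PySem.Str.strip line) "requires-python =" then
      line :: (block ++ rest)
    else line :: pvSplice block rest

-- a line stripping to "]" does not start with "classifiers = ["
theorem pv_not_both (s : String) :
    PySem.Str.startswith (PySem.Str.strip s) "classifiers = [" = true →
    (PySem.Str.strip s == "]") = false := by
  intro h
  cases hbe : (PySem.Str.strip s == "]") with
  | false => rfl
  | true =>
    have he : PySem.Str.strip s = "]" := by simpa using hbe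
    rw [he] at h
    exact absurd h (by decide)

theorem pvAFind_succ (xs : List String) (i : Nat) :
    pvAFind xs (i + 1) = (pvAFind xs i).map (· + 1) := by
  induction xs generalizing i with
  | nil => simp [pvAFind]
  | cons x rest ih =>
    simp only [pvAFind]
    split <;> simp [ih]

theorem pvSplice_eq (block out : List String) :
    out.take ((pvAFind out 0).getD out.length) ++ block ++ out.drop ((pvAFind out 0).getD out.length)
      = pvSplice block out := by
  induction out with
  | nil => simp [pvAFind, pvSplice]
  | cons line rest ih =>
    simp only [pvAFind, pvSplice]
    cases h : PySem.Str.startswith (PySem.Str.strip line) "requires-python =" with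
    | true => simp
    | false =>
      rw [pvAFind_succ rest 0]
      cases hf : pvAFind rest 0 with
      | none =>
        rw [hf] at ih
        simpa [hf] using ih
      | some k =>
        rw [hf] at ih
        simpa [hf, List.take_succ_cons, List.drop_succ_cons] using ih

-- once inserted, B's loop is exactly A's filter loop
theorem pvBLoop_inserted (block : List String) (xs : List String) (inc : Bool) :
    pvBLoop block xs inc true = pvAFilter xs inc := by
  induction xs generalizing inc with
  | nil => simp [pvBLoop, pvAFilter]
  | cons line rest ih =>
    simp only [pvBLoop, pvAFilter]
    cases hc : PySem.Str.startswith (PySem.Str.strip line) "classifiers = [" with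
    | true =>
      have hb := pv_not_both line hc
      cases inc <;> simp [hb, ih]
    | false =>
      cases inc with
      | false => simp [ih]
      | true =>
        cases hb : (PySem.Str.strip line == "]") <;> simp [ih]

-- before insertion, B's loop equals the splice of A's filter loop
theorem pvBLoop_not_inserted (block : List String) (xs : List String) (inc : Bool) :
    pvBLoop block xs inc false = pvSplice block (pvAFilter xs inc) := by
  induction xs generalizing inc with
  | nil => simp [pvBLoop, pvAFilter, pvSplice]
  | cons line rest ih =>
    simp only [pvBLoop, pvAFilter]
    cases hc : PySem.Str.startswith (PySem.Str.strip line) "classifiers = [" with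
    | true =>
      have hb := pv_not_both line hc
      cases inc <;> simp [hb, ih]
    | false =>
      cases inc with
      | true =>
        cases hb : (PySem.Str.strip line == "]") <;> simp [ih]
      | false =>
        cases hr : PySem.Str.startswith (PySem.Str.strip line) "requires-python =" with
        | true =>
          have h1 : pvSplice block (line :: pvAFilter rest false)
              = line :: (block ++ pvAFilter rest false) := by
            simp only [pvSplice]; rw [hr]; simp
          simp [h1, pvBLoop_inserted]
        | false =>
          have h2 : pvSplice block (line :: pvAFilter rest false)
              = line :: pvSplice block (pvAFilter rest false) := by
            simp only [pvSplice]; rw [hr]; simp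
          simp [h2, ih]

-- ===== VERDICT (by name: the statement is the Claim_ definition above) =====
theorem replace_project_classifiers_py_spec : Claim_equal_replace_project_classifiers_py := by
  intro section_ classifiers _
  unfold Spec_replace_project_classifiers_py replace_project_classifiers_py replace_project_classifiers_py_alt
  rw [pvBLoop_not_inserted]
  exact pvSplice_eq _ _
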